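-- pv_equiv track=rewrite | github.com/ajolasore/Python-Programming-Projects---Starter-Packs | Functions/numeronym.py | isnumeronym
-- ===== SOURCE A (Python) =====
-- def isnumeronym(n, w):
--     # Convert both input words to lowercase to ignore case distinctions
--     n = n.lower()
--     w = w.lower()
--
--     i = 0  # Index for the word 'w'
--     j = 0  # Index for the word 'n'
--
--     while i < len(w) and j < len(n):
--         if n[j].isdigit():
--             # Form the integer from consecutive digits
--             num_letters = ""
--             while j < len(n) and n[j].isdigit():
--                 num_letters += n[j]
--                 j += 1
--             num_letters = int(num_letters)
--             i += num_letters
--         elif n[j] == w[i]: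
--             j += 1
--             i += 1
--         else:
--             return False
--
--     # If both indices reach the end, it's a numeronym
--     return i == len(w) and j == len(n)
-- ===== SOURCE B (Python) =====
-- def isnumeronym(n, w):
--     # Compile n into a token list (ints for digit runs, chars otherwise), then
--     # match the tokens against w in a single separate pass.
--     n = n.lower()
--     w = w.lower()
--     tokens = []
--     j = 0
--     while j < len(n):
--         if n[j].isdigit():
--             k = j
--             while k < len(n) and n[k].isdigit():
--                 k += 1
--             tokens.append(int(n[j:k]))
--             j = k
--         else:
--             tokens.append(n[j])
--             j += 1
--     pos = 0
--     for tok in tokens: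
--         if pos >= len(w):
--             return False  # pattern left but word exhausted
--         if isinstance(tok, int):
--             pos += tok
--         elif tok == w[pos]:
--             pos += 1
--         else:
--             return False
--     return pos == len(w)
-- ===== Notes on version B (the rewrite author's own statement) =====
-- stated objective: alternative
-- what changed: A's interleaved two-pointer walk over n and w is replaced by a two-phase design: compile n once into a token list (int for each maximal digit run, char otherwise), then match the tokens against w in a separate single pass.
import Mathlib
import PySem

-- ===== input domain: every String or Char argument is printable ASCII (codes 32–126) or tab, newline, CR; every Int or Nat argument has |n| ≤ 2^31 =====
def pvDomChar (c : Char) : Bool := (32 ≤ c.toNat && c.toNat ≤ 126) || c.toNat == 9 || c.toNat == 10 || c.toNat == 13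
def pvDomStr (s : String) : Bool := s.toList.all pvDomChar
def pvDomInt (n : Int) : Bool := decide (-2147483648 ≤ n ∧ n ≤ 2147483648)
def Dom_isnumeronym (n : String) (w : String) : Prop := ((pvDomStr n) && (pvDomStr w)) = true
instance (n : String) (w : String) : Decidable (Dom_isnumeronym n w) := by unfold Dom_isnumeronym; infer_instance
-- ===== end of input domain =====

-- B replaces A's interleaved two-pointer walk by compiling n into a token list and
-- matching it against w in a separate single pass (objective: alternative decomposition).

-- ===== PORT A =====
-- int(ds) for a nonempty ASCII digit string ds: exact on that domain (both Pythons
-- only ever call int on maximal runs of '0'..'9').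
def pvDigitsToNat (ds : List Char) : Nat :=
  ds.foldl (fun a d => a * 10 + (d.toNat - 48)) 0

-- A's while loop: i indexes w, nrest is the unread suffix of n (j = position in n).
def isnumeronymLoop (w : List Char) (nrest : List Char) (i : Nat) : Bool :=
  match nrest with
  | [] => i == w.length                           -- loop exit with j = len(n)
  | c :: rest =>
    if i < w.length then
      if PySem.Chars.isdigit c then
        -- inner while: consume the maximal digit run, advance i by its int value
        isnumeronymLoop w ((c :: rest).dropWhile PySem.Chars.isdigit)
          (i + pvDigitsToNat ((c :: rest).takeWhile PySem.Chars.isdigit))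
      else if w[i]? == some c then
        isnumeronymLoop w rest (i + 1)
      else false
    else false                                    -- loop exit with j < len(n): i == len(w) && j == len(n) is False
termination_by nrest.length
decreasing_by
  · simp only [List.dropWhile_cons_of_pos ‹PySem.Chars.isdigit c = true›, List.length_cons]
    exact Nat.lt_succ_of_le (List.length_dropWhile_le _ _)
  · simp

def isnumeronym (n : String) (w : String) : Bool :=
  isnumeronymLoop (PySem.Str.lower w).toList (PySem.Str.lower n).toList 0

-- ===== PORT B =====
inductive PvTok
  | skip : Nat → PvTok      -- a maximal digit run, as its int value
  | lit : Char → PvTok      -- a single non-digit character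
deriving DecidableEq, Repr

-- Source B's first while loop: compile n into tokens (n[j:k] = takeWhile on the suffix).
def pvTokenize : List Char → List PvTok
  | [] => []
  | c :: rest =>
    if PySem.Chars.isdigit c then
      PvTok.skip (pvDigitsToNat ((c :: rest).takeWhile PySem.Chars.isdigit))
        :: pvTokenize ((c :: rest).dropWhile PySem.Chars.isdigit)
    else
      PvTok.lit c :: pvTokenize rest
termination_by l => l.length
decreasing_by
  · simp only [List.dropWhile_cons_of_pos ‹PySem.Chars.isdigit c = true›, List.length_cons]
    exact Nat.lt_succ_of_le (List.length_dropWhile_le _ _)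
  · simp

-- Source B's for loop over the tokens, pos indexing w.
def pvMatch (w : List Char) : List PvTok → Nat → Bool
  | [], pos => pos == w.length
  | t :: ts, pos =>
    if pos < w.length then
      match t with
      | PvTok.skip k => pvMatch w ts (pos + k)
      | PvTok.lit c => if w[pos]? == some c then pvMatch w ts (pos + 1) else false
    else false                                    -- pattern left but word exhausted

def isnumeronym_alt (n : String) (w : String) : Bool :=
  pvMatch (PySem.Str.lower w).toList (pvTokenize (PySem.Str.lower n).toList) 0

-- ===== PRECONDITION & SPEC =====
def Spec_isnumeronym (n : String) (w : String) (out : Bool) : Prop := out = isnumeronym_alt n w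
instance (n : String) (w : String) (out : Bool) : Decidable (Spec_isnumeronym n w out) := by unfold Spec_isnumeronym; infer_instance

-- ===== CLAIM (what is proved, stated in full; the proofs are below) =====
def Claim_equal_isnumeronym : Prop := ∀ (n : String) (w : String), Dom_isnumeronym n w → Spec_isnumeronym n w (isnumeronym n w)

-- ===== LEMMAS AND PROOFS =====
-- A's interleaved loop equals "tokenize, then match", for every suffix of n and position i.
theorem pvLoop_eq_match (w : List Char) (nrest : List Char) (i : Nat) :
    isnumeronymLoop w nrest i = pvMatch w (pvTokenize nrest) i := by
  match nrest with
  | [] => simp [isnumeronymLoop, pvTokenize, pvMatch]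
  | c :: rest =>
    rw [isnumeronymLoop, pvTokenize]
    by_cases hd : PySem.Chars.isdigit c
    · simp only [hd, if_pos]
      by_cases hi : i < w.length
      · simp only [hi, if_pos, pvMatch]
        have := pvLoop_eq_match w ((c :: rest).dropWhile PySem.Chars.isdigit)
          (i + pvDigitsToNat ((c :: rest).takeWhile PySem.Chars.isdigit))
        simpa [hi] using this
      · simp [hi, pvMatch]
    · simp only [hd, if_neg, Bool.false_eq_true, not_false_iff]
      by_cases hi : i < w.length
      · simp [hi, pvMatch, pvLoop_eq_match w rest (i + 1)]
      · simp [hi, pvMatch]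
termination_by nrest.length
decreasing_by
  · simp only [List.dropWhile_cons_of_pos ‹PySem.Chars.isdigit c = true›, List.length_cons]
    exact Nat.lt_succ_of_le (List.length_dropWhile_le _ _)
  · simp

-- ===== VERDICT (by name: the statement is the Claim_ definition above) =====
theorem isnumeronym_spec : Claim_equal_isnumeronym := by
  intro n w _
  unfold Spec_isnumeronym isnumeronym isnumeronym_alt
  exact pvLoop_eq_match _ _ _
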